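-- pv_equiv track=rewrite | github.com/PNeekeetah/ExercisesAnalysis | json_rules.py | breaks_comma_rule
-- ===== SOURCE A (Python) =====
-- from typing import List, Callable, Tuple, Set
--
-- def find_occurrences(string: str, character_to_find: chr) -> List[int]:
--     """
--     Return a list of all character occurences
--
--     In:
--         string: the string where we want to find the positions
--         character_to_find: the symbol we wish to find in "string"
--
--     Out:
--         A list of all positions of "character_to_find" in "string"
--     """
--     return [
--         i
--         for i, letter in enumerate(string)
--         if letter == character_to_find
--     ]
--
-- def breaks_comma_rule(json_lines: List[str]) -> Tuple[bool, str]: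
--     """
--     1. Only 1 comma is allowed at the end of a line
--     2. No comma is allowed for the last JSON entry
--     3. A comma is allowed between quotes
--     4. There should always be at least one comma per line
--     5. The last character on a line should be a comma ( minus whitespaces)
--
--     In:
--         json_lines: The lines which make up the message
--
--     Out:
--         True, "comma_rule" if the rules written above are broken.
--         False, "" otherwise
--     """
--
--     # Ignore first line ( which is supposed to be '{') and
--     # ignore last 2 lines ( "super_set" entry and '}').
--     for line in json_lines[1:-2]:
--         commas = line.count(',')
--         # 4
--         if commas == 0:
--             return True, "comma_rule"
--         # 3
--         if commas > 1:
--             comma_positions = find_occurrences(line, ',')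
--             quote_positions = find_occurrences(line, '"')
--             paired_quote_positions = list(zip(*[iter(quote_positions)]*2))
--             for comma_position in comma_positions[:-1]:
--                 if not any (
--                     first_q_pos < comma_position
--                     and comma_position < second_q_pos
--                     for (first_q_pos, second_q_pos) in paired_quote_positions
--                 ):
--                     return True, "comma_rule"
--         # 1, 5
--         if line.strip()[-1] != ',':
--             return True, "comma_rule"
--
--     # 2
--     if ',' in json_lines[-2]:
--         return True, "comma_rule"
--
--     return False, ""
-- ===== SOURCE B (Python) =====
-- from typing import List, Tuple
--
-- def breaks_comma_rule(json_lines: List[str]) -> Tuple[bool, str]: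
--     """
--     Single-pass re-implementation: instead of building comma/quote position
--     lists and pairing quotes, scan each line once left to right maintaining
--     an in_quote toggle; a comma breaks the rules when it is not the line's
--     last comma and is not inside a closed quote pair (i.e. not in_quote, or
--     no quote follows it).
--     """
--     for line in json_lines[1:-2]:
--         if line.count(',') == 0:
--             return True, "comma_rule"
--         last_comma = line.rfind(',')
--         last_quote = line.rfind('"')
--         in_quote = False
--         for i, ch in enumerate(line):
--             if ch == '"':
--                 in_quote = not in_quote
--             elif ch == ',' and i != last_comma and not (in_quote and i < last_quote):
--                 return True, "comma_rule"
--         if line.strip()[-1] != ',':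
--             return True, "comma_rule"
--     if ',' in json_lines[-2]:
--         return True, "comma_rule"
--     return False, ""
-- ===== Notes on version B (the rewrite author's own statement) =====
-- stated objective: simpler
-- what changed: A builds comma/quote position lists per line, pairs the quotes with zip(*[iter(..)]*2) and runs a nested any over all pairs for each non-final comma; B replaces all of that by one left-to-right scan per line with an in_quote toggle plus two rfind calls, flagging the first comma that is not the last one and not inside a closed quote pair.
import Mathlib
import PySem

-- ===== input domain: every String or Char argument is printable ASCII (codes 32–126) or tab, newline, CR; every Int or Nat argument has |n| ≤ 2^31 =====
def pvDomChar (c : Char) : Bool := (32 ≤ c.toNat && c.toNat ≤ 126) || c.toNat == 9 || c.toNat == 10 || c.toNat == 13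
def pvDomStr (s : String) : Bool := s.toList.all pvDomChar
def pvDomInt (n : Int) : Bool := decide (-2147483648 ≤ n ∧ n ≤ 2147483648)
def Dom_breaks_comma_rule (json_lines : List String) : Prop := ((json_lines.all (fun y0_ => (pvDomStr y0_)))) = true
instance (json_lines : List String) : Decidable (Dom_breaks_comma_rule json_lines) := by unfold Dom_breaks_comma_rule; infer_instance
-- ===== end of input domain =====

-- B replaces A's build-comma/quote-position-lists-then-pair-then-nested-any per line by a single
-- left-to-right scan with an in_quote toggle (objective: simpler, no speed claim).

-- ===== PORT A =====
def find_occurrences (s : String) (c : Char) : List Int :=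
  ((PySem.List.enumerate s.toList).filter (fun p => p.2 == c)).map (fun p => p.1)

-- zip(*[iter(qs)]*2): consecutive disjoint pairs, leftover dropped
def pvPairs : List Int → List (Int × Int)
  | a :: b :: t => (a, b) :: pvPairs t
  | _ => []

-- the rule-3 body of A (the inner 'for … if not any(…): return' is an 'any' over cps[:-1])
def pvLineBad3 (line : String) : Bool :=
  let comma_positions := find_occurrences line ','
  let quote_positions := find_occurrences line '"'
  let paired := pvPairs quote_positions
  (PySem.List.slice comma_positions none (some (-1))).any
    (fun cp => !(paired.any (fun q => decide (q.1 < cp) && decide (cp < q.2))))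

-- the 'for line in json_lines[1:-2]' loop with its early returns
def pvALoop : List String → Option (Bool × String)
  | [] => none
  | line :: rest =>
    let commas := PySem.Str.count line ","
    if commas = 0 then some (true, "comma_rule")
    else if decide (1 < commas) && pvLineBad3 line then some (true, "comma_rule")
    else if PySem.Str.pyGet? (PySem.Str.strip line) (-1) ≠ some ',' then some (true, "comma_rule")
    else pvALoop rest

def breaks_comma_rule (json_lines : List String) : Bool × String :=
  match pvALoop (PySem.List.slice json_lines (some 1) (some (-2))) with
  | some r => r
  | none =>
    match PySem.List.pyGet? json_lines (-2) with
    | some last => if PySem.Str.isIn "," last then (true, "comma_rule") else (false, "")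
    | none => (false, "")  -- Python raises IndexError here (len < 2); excluded by Pre_

-- ===== PORT B =====
-- single pass over enumerate(line) with an in_quote toggle
def pvBScan (lastC lastQ : Int) : List (Int × Char) → Bool → Bool
  | [], _ => false
  | (i, ch) :: rest, in_quote =>
    if ch = '"' then pvBScan lastC lastQ rest (!in_quote)
    else if ch = ',' ∧ i ≠ lastC ∧ ¬(in_quote = true ∧ i < lastQ) then true
    else pvBScan lastC lastQ rest in_quote

def pvBLoop : List String → Option (Bool × String)
  | [] => none
  | line :: rest =>
    if PySem.Str.count line "," = 0 then some (true, "comma_rule")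
    else
      let last_comma := PySem.Str.rfind line ","
      let last_quote := PySem.Str.rfind line "\""
      if pvBScan last_comma last_quote (PySem.List.enumerate line.toList) false then
        some (true, "comma_rule")
      else if PySem.Str.pyGet? (PySem.Str.strip line) (-1) ≠ some ',' then some (true, "comma_rule")
      else pvBLoop rest

def breaks_comma_rule_alt (json_lines : List String) : Bool × String :=
  match pvBLoop (PySem.List.slice json_lines (some 1) (some (-2))) with
  | some r => r
  | none =>
    match PySem.List.pyGet? json_lines (-2) with
    | some last => if PySem.Str.isIn "," last then (true, "comma_rule") else (false, "")
    | none => (false, "")  -- Python raises IndexError here (len < 2); excluded by Pre_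

-- ===== PRECONDITION & SPEC =====
-- A evaluates json_lines[-2], which raises IndexError when the list has fewer than 2 elements.
def Pre_breaks_comma_rule (json_lines : List String) : Prop := 2 ≤ json_lines.length
instance (json_lines : List String) : Decidable (Pre_breaks_comma_rule json_lines) := by
  unfold Pre_breaks_comma_rule; infer_instance

def pvWitness_breaks_comma_rule : List String := ["{", "\"a\": 1,", "\"s\": []", "}"]

def Spec_breaks_comma_rule (json_lines : List String) (out : Bool × String) : Prop := out = breaks_comma_rule_alt json_lines
instance (json_lines : List String) (out : Bool × String) : Decidable (Spec_breaks_comma_rule json_lines out) := by unfold Spec_breaks_comma_rule; infer_instance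

-- ===== CLAIM (what is proved, stated in full; the proofs are below) =====
def Claim_equal_breaks_comma_rule : Prop := ∀ (json_lines : List String), Dom_breaks_comma_rule json_lines → Pre_breaks_comma_rule json_lines → Spec_breaks_comma_rule json_lines (breaks_comma_rule json_lines)

-- ===== LEMMAS AND PROOFS =====
theorem pv_count_go (c : Char) (l : List Char) (fuel acc : Nat) (h : l.length ≤ fuel) :
    PySem.Chars.count.go [c] fuel l acc = acc + l.count c := by
  induction l generalizing fuel acc with
  | nil => cases fuel <;> simp [PySem.Chars.count.go]
  | cons a t ih =>
    cases fuel with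
    | zero => simp at h
    | succ n =>
      rw [PySem.Chars.count.go]
      by_cases hac : a = c
      · subst hac
        simp [List.isPrefixOf, ih _ _ (by simpa using h)]
        omega
      · have : List.isPrefixOf [c] (a :: t) = false := by
          simp [List.isPrefixOf]; exact fun hh => (hac hh.symm).elim
        rw [this]
        simp [ih _ _ (by simpa using h), hac]

theorem pv_count_char (s : String) (c : Char) (sub : String) (hs : sub.toList = [c]) :
    PySem.Str.count s sub = s.toList.count c := by
  rw [PySem.Str.count_eq, hs, PySem.Chars.count, if_neg (by simp)]
  simpa using pv_count_go c s.toList s.toList.length 0 le_rfl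

-- [c].isPrefixOf l = (l[0]? = some c)
theorem pv_singleton_prefix (c : Char) (l : List Char) :
    List.isPrefixOf [c] l = (l[0]? == some c) := by
  cases l <;> simp [List.isPrefixOf, eq_comm]

theorem pv_rfind_go_char (s : List Char) (c : Char) (j : Nat) :
    (PySem.Chars.rfind.go s [c] j = -1 ∧ ∀ i ≤ j, s[i]? ≠ some c)
    ∨ ∃ m : Nat, m ≤ j ∧ PySem.Chars.rfind.go s [c] j = (m : Int) ∧ s[m]? = some c ∧
        ∀ i, m < i → i ≤ j → s[i]? ≠ some c := by
  induction j with
  | zero =>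
    rw [PySem.Chars.rfind.go]
    by_cases h : s[0]? = some c
    · right; exact ⟨0, le_rfl, by simp [pv_singleton_prefix, h], h, by omega⟩
    · left
      refine ⟨by simp [pv_singleton_prefix, h], ?_⟩
      intro i hi; interval_cases i; exact h
  | succ n ih =>
    rw [PySem.Chars.rfind.go]
    by_cases h : s[n+1]? = some c
    · right
      refine ⟨n+1, le_rfl, ?_, h, by omega⟩
      have : List.isPrefixOf [c] (s.drop (n+1)) = true := by
        simp [pv_singleton_prefix]
        simpa [List.getElem?_drop] using h
      simp [this]
    · have hpre : List.isPrefixOf [c] (s.drop (n+1)) = false := by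
        simp [pv_singleton_prefix]
        simpa [List.getElem?_drop] using h
      rw [hpre]
      simp only [Bool.false_eq_true, if_false]
      rcases ih with ⟨he, hall⟩ | ⟨m, hm, he, hc, hmax⟩
      · left
        refine ⟨he, fun i hi => ?_⟩
        rcases Nat.lt_or_ge i (n+1) with h'|h'
        · exact hall i (by omega)
        · have : i = n+1 := by omega
          subst this; exact h
      · right
        refine ⟨m, by omega, he, hc, fun i h1 h2 => ?_⟩
        rcases Nat.lt_or_ge i (n+1) with h'|h'
        · exact hmax i h1 (by omega)
        · have : i = n+1 := by omega
          subst this; exact h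
theorem pv_rfind_lt_iff (s : List Char) (c : Char) (i : Nat) :
    ((i : Int) < PySem.Chars.rfind s [c]) ↔ ∃ q, i < q ∧ s[q]? = some c := by
  rw [PySem.Chars.rfind]
  rcases pv_rfind_go_char s c s.length with ⟨he, hall⟩ | ⟨m, hm, he, hc, hmax⟩
  · rw [he]
    constructor
    · intro h; omega
    · rintro ⟨q, _, hq⟩
      rcases Nat.lt_or_ge q s.length with h'|h'
      · exact absurd hq (hall q (by omega))
      · rw [List.getElem?_eq_none h'] at hq; exact absurd hq (by simp)
  · rw [he]
    constructor
    · intro h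
      exact ⟨m, by exact_mod_cast h, hc⟩
    · rintro ⟨q, hiq, hq⟩
      have hql : q < s.length := by
        by_contra h'
        rw [List.getElem?_eq_none (by omega)] at hq; simp at hq
      have hqm : q ≤ m := by
        by_contra h'
        exact absurd hq (hmax q (by omega) (by omega))
      exact_mod_cast lt_of_lt_of_le hiq (by exact_mod_cast hqm)

theorem pv_rfind_ne_iff (s : List Char) (c : Char) (i : Nat) (hi : s[i]? = some c) :
    ((i : Int) ≠ PySem.Chars.rfind s [c]) ↔ ∃ q, i < q ∧ s[q]? = some c := by
  have hil : i < s.length := by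
    by_contra h'
    rw [List.getElem?_eq_none (by omega)] at hi; simp at hi
  rw [← pv_rfind_lt_iff]
  rw [PySem.Chars.rfind]
  rcases pv_rfind_go_char s c s.length with ⟨he, hall⟩ | ⟨m, hm, he, hc, hmax⟩
  · exact absurd hi (hall i (by omega))
  · rw [he]
    have him : i ≤ m := by
      by_contra h'
      exact absurd hi (hmax i (by omega) (by omega))
    constructor
    · intro h; omega
    · intro h; omega

def pvOcc (cs : List Char) (c : Char) (k : Int) : List Int :=
  ((PySem.List.enumerate cs k).filter (fun p => p.2 == c)).map (fun p => p.1)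

theorem pvOcc_cons (a : Char) (t : List Char) (c : Char) (k : Int) :
    pvOcc (a :: t) c k = (if a = c then [k] else []) ++ pvOcc t c (k + 1) := by
  simp only [pvOcc, PySem.List.enumerate_cons, List.filter_cons]
  split <;> rename_i h <;> split <;> rename_i h2 <;> simp_all

theorem pvOcc_mem (cs : List Char) (c : Char) (k x : Int) :
    x ∈ pvOcc cs c k ↔ ∃ j : Nat, cs[j]? = some c ∧ x = k + j := by
  induction cs generalizing k with
  | nil => simp [pvOcc]
  | cons a t ih =>
    rw [pvOcc_cons]
    simp only [List.mem_append, ih]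
    constructor
    · rintro (h | ⟨j, hj, hx⟩)
      · refine ⟨0, ?_, ?_⟩ <;> split_ifs at h <;> simp_all
      · exact ⟨j + 1, by simpa using hj, by push_cast; omega⟩
    · rintro ⟨j, hj, hx⟩
      cases j with
      | zero => left; simp at hj; simp [hj, hx]
      | succ j' =>
        right; exact ⟨j', by simpa using hj, by push_cast at hx ⊢; omega⟩

theorem pvOcc_pairwise (cs : List Char) (c : Char) (k : Int) :
    (pvOcc cs c k).Pairwise (· < ·) := by
  induction cs generalizing k with
  | nil => simp [pvOcc]
  | cons a t ih =>
    rw [pvOcc_cons]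
    split
    · simp only [List.singleton_append, List.pairwise_cons]
      refine ⟨fun y hy => ?_, ih (k+1)⟩
      rw [pvOcc_mem] at hy
      obtain ⟨j, _, hy⟩ := hy
      omega
    · simpa using ih (k+1)

theorem pvOcc_length (cs : List Char) (c : Char) (k : Int) :
    (pvOcc cs c k).length = cs.count c := by
  induction cs generalizing k with
  | nil => simp [pvOcc]
  | cons a t ih =>
    rw [pvOcc_cons, List.count_cons, List.length_append, ih]
    by_cases h : a = c
    · rw [if_pos h, if_pos (by simp [h])]
      simp; omega
    · rw [if_neg h, if_neg (by simp; exact fun hh => h hh)]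
      simp

theorem pvOcc_filter_take (cs : List Char) (c : Char) (k : Int) (j : Nat) :
    (pvOcc cs c k).filter (fun q => decide (q < k + (j : Int))) = pvOcc (cs.take j) c k := by
  induction cs generalizing k j with
  | nil => simp [pvOcc]
  | cons a t ih =>
    cases j with
    | zero =>
      rw [List.take_zero]
      refine List.filter_eq_nil_iff.mpr (fun x hx => ?_)
      rw [pvOcc_mem] at hx
      obtain ⟨j', _, hx⟩ := hx
      simp; omega
    | succ j' =>
      rw [List.take_succ_cons, pvOcc_cons, pvOcc_cons, List.filter_append]
      have hb : ((((j' + 1 : Nat)) : Int)) = (j' : Int) + 1 := by push_cast; ring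
      rw [hb]
      congr 1
      · split
        · simp only [List.filter_cons, List.filter_nil]
          rw [if_pos (by simp)]
        · simp
      · rw [show k + ((j' : Int) + 1) = (k + 1) + (j' : Int) from by ring]
        exact ih (k + 1) j'
theorem pv_mem_dropLast {l : List Int} (hp : l.Pairwise (· < ·)) (x : Int) :
    x ∈ l.dropLast ↔ x ∈ l ∧ ∃ y ∈ l, x < y := by
  induction l with
  | nil => simp
  | cons a t ih =>
    cases t with
    | nil => simp; intro h; omega
    | cons b t' =>
      rw [List.dropLast_cons₂]
      have hp' : (b :: t').Pairwise (· < ·) := hp.of_cons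
      have hab : ∀ z ∈ b :: t', a < z := fun z hz => (List.pairwise_cons.mp hp).1 z hz
      constructor
      · intro h
        rcases List.mem_cons.mp h with rfl | h
        · exact ⟨List.mem_cons_self .., ⟨b, by simp, hab b (by simp)⟩⟩
        · obtain ⟨h1, y, hy, hxy⟩ := (ih hp').mp h
          exact ⟨List.mem_cons_of_mem _ h1, y, List.mem_cons_of_mem _ hy, hxy⟩
      · rintro ⟨h1, y, hy, hxy⟩
        rcases List.mem_cons.mp h1 with rfl | h1
        · exact List.mem_cons_self ..
        · refine List.mem_cons_of_mem _ ((ih hp').mpr ⟨h1, ?_⟩)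
          rcases List.mem_cons.mp hy with heq | hy
          · exact absurd hxy (by have := hab x h1; omega)
          · exact ⟨y, hy, hxy⟩

theorem pv_pairs_any_iff (qs : List Int) (hp : qs.Pairwise (· < ·)) (p : Int) (hnp : p ∉ qs) :
    ((pvPairs qs).any (fun q => decide (q.1 < p) && decide (p < q.2)) = true) ↔
    (Odd ((qs.filter (fun q => decide (q < p))).length) ∧ ∃ q ∈ qs, p < q) := by
  induction qs using pvPairs.induct with
  | case1 a b t ih =>
    have hab : a < b := (List.pairwise_cons.mp hp).1 b (by simp)
    have hat : ∀ z ∈ t, a < z := fun z hz => (List.pairwise_cons.mp hp).1 z (by simp [hz])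
    have hbt : ∀ z ∈ t, b < z := fun z hz => (List.pairwise_cons.mp hp.of_cons).1 z hz
    have hpt : t.Pairwise (· < ·) := hp.of_cons.of_cons
    have hpa : p ≠ a := fun h => hnp (by simp [h])
    have hpb : p ≠ b := fun h => hnp (by simp [h])
    have hpnt : p ∉ t := fun h => hnp (by simp [h])
    rw [pvPairs]
    rw [List.any_cons]
    rcases lt_trichotomy p a with hlt | heq | hgt
    · have hft : t.filter (fun q => decide (q < p)) = [] :=
        List.filter_eq_nil_iff.mpr (fun z hz => by simp only [decide_eq_true_eq, not_lt]; have := hat z hz; omega)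
      rw [List.filter_cons_of_neg (by simp only [decide_eq_true_eq, not_lt]; omega),
          List.filter_cons_of_neg (by simp only [decide_eq_true_eq, not_lt]; omega), hft]
      constructor
      · intro h
        rcases Bool.or_eq_true_iff.mp h with h | h
        · simp only [Bool.and_eq_true, decide_eq_true_eq] at h; omega
        · exact absurd ((ih hpt hpnt).mp h).1 (by rw [hft]; simp [Nat.odd_iff])
      · rintro ⟨ho, _⟩
        exact absurd ho (by simp [Nat.odd_iff])
    · exact absurd heq.symm (Ne.symm hpa)
    · rcases lt_trichotomy p b with hlt2 | heq2 | hgt2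
      · have hft : t.filter (fun q => decide (q < p)) = [] :=
          List.filter_eq_nil_iff.mpr (fun z hz => by simp only [decide_eq_true_eq, not_lt]; have := hbt z hz; omega)
        rw [List.filter_cons_of_pos (by simpa using hgt),
            List.filter_cons_of_neg (by simp only [decide_eq_true_eq, not_lt]; omega), hft]
        constructor
        · intro _
          exact ⟨by simp, b, by simp, hlt2⟩
        · intro _
          apply Bool.or_eq_true_iff.mpr
          left
          simp only [Bool.and_eq_true, decide_eq_true_eq]; omega
      · exact absurd heq2.symm (Ne.symm hpb)
      · rw [List.filter_cons_of_pos (by simpa using hgt),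
            List.filter_cons_of_pos (by simpa using hgt2)]
        have hfirst : (decide (a < p) && decide (p < b)) = false := by
          simp only [Bool.and_eq_false_iff, decide_eq_false_iff_not, not_lt]; right; omega
        rw [hfirst]
        rw [Bool.false_or, ih hpt hpnt]
        constructor
        · rintro ⟨ho, q, hq, hpq⟩
          refine ⟨?_, q, by simp [hq], hpq⟩
          simp only [List.length_cons]
          rw [Nat.odd_iff] at ho ⊢; omega
        · rintro ⟨ho, q, hq, hpq⟩
          have hq' : q ∈ t := by
            rcases List.mem_cons.mp hq with rfl | hq
            · omega
            · rcases List.mem_cons.mp hq with rfl | hq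
              · omega
              · exact hq
          refine ⟨?_, q, hq', hpq⟩
          simp only [List.length_cons] at ho
          rw [Nat.odd_iff] at ho ⊢; omega
  | case2 l h =>
    rcases l with _ | ⟨x, _ | ⟨y, t⟩⟩
    · simp [pvPairs]
    · have hpx : p ≠ x := fun hh => hnp (by simp [hh])
      show (pvPairs [x]).any _ = true ↔ _
      constructor
      · intro hh; simp [pvPairs] at hh
      · rintro ⟨ho, q, hq, hpq⟩
        obtain rfl : q = x := by simpa using hq
        by_cases hx : q < p
        · omega
        · rw [List.filter_cons_of_neg (by simpa using hx)] at ho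
          exact absurd ho (by simp [Nat.odd_iff])
    · exact ((h x y t rfl)).elim

theorem pv_decide_odd_succ (n : Nat) : decide (Odd (n + 1)) = !decide (Odd n) := by
  rw [show (!decide (Odd n)) = decide (¬ Odd n) from (decide_not).symm]
  exact decide_eq_decide.mpr (by rw [Nat.odd_iff, Nat.odd_iff]; omega)

theorem pv_scan_iff (lastC lastQ : Int) (cs : List Char) (k : Int) (inQ : Bool) :
    pvBScan lastC lastQ (PySem.List.enumerate cs k) inQ = true ↔
    ∃ j : Nat, cs[j]? = some ',' ∧ (k + (j : Int) ≠ lastC) ∧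
      ¬(((inQ ^^ decide (Odd ((cs.take j).count '"'))) = true) ∧ k + (j : Int) < lastQ) := by
  induction cs generalizing k inQ with
  | nil =>
    rw [PySem.List.enumerate_nil]
    simp [pvBScan]
  | cons c t ih =>
    rw [PySem.List.enumerate_cons, pvBScan]
    by_cases hq : c = '"'
    · rw [if_pos hq, ih]
      subst hq
      constructor
      · rintro ⟨j, hj, hne, hcond⟩
        refine ⟨j + 1, by simpa using hj, by push_cast; omega, ?_⟩
        rw [List.take_succ_cons, List.count_cons_self]
        rw [pv_decide_odd_succ]
        intro ⟨h1, h2⟩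
        apply hcond
        refine ⟨?_, by push_cast at h2 ⊢; omega⟩
        cases inQ <;> cases hdec : decide (Odd ((List.take j t).count '"')) <;>
          simp_all
      · rintro ⟨j, hj, hne, hcond⟩
        cases j with
        | zero => simp at hj
        | succ j' =>
          refine ⟨j', by simpa using hj, by push_cast at hne; omega, ?_⟩
          rw [List.take_succ_cons, List.count_cons_self] at hcond
          rw [pv_decide_odd_succ] at hcond
          intro ⟨h1, h2⟩
          apply hcond
          refine ⟨?_, by push_cast at h2 ⊢; omega⟩
          cases inQ <;> cases hdec : decide (Odd ((List.take j' t).count '"')) <;>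
            simp_all
    · rw [if_neg hq]
      by_cases hcnd : c = ',' ∧ k ≠ lastC ∧ ¬(inQ = true ∧ k < lastQ)
      · rw [if_pos hcnd]
        simp only [true_iff]
        obtain ⟨hc, hne, hnq⟩ := hcnd
        refine ⟨0, by simp [hc], by simpa using hne, ?_⟩
        simpa using hnq
      · rw [if_neg hcnd, ih]
        constructor
        · rintro ⟨j, hj, hne, hcond⟩
          refine ⟨j + 1, by simpa using hj, by push_cast; omega, ?_⟩
          rw [List.take_succ_cons, List.count_cons_of_ne hq]
          intro ⟨h1, h2⟩
          exact hcond ⟨h1, by push_cast at h2 ⊢; omega⟩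
        · rintro ⟨j, hj, hne, hcond⟩
          cases j with
          | zero =>
            exfalso
            simp only [List.getElem?_cons_zero, Option.some_inj] at hj
            apply hcnd
            refine ⟨hj, by simpa using hne, ?_⟩
            simpa using hcond
          | succ j' =>
            refine ⟨j', by simpa using hj, by push_cast at hne; omega, ?_⟩
            rw [List.take_succ_cons, List.count_cons_of_ne hq] at hcond
            intro ⟨h1, h2⟩
            exact hcond ⟨h1, by push_cast at h2 ⊢; omega⟩

-- two positions holding the same char force count ≥ 2
theorem pv_two_count (cs : List Char) (c : Char) (j q : Nat) (hj : cs[j]? = some c)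
    (hq : cs[q]? = some c) (hjq : j < q) : 2 ≤ cs.count c := by
  have h1 : ((j : Int)) ∈ pvOcc cs c 0 := (pvOcc_mem cs c 0 j).mpr ⟨j, hj, by omega⟩
  have h2 : ((q : Int)) ∈ pvOcc cs c 0 := (pvOcc_mem cs c 0 q).mpr ⟨q, hq, by omega⟩
  have hlen := pvOcc_length cs c 0
  rcases hoc : pvOcc cs c 0 with _ | ⟨a, _ | ⟨b, t⟩⟩
  · rw [hoc] at h1; simp at h1
  · rw [hoc] at h1 h2
    simp at h1 h2
    omega
  · rw [hoc] at hlen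
    simp at hlen
    omega

-- the per-line equivalence: A's rule-3 check (guarded by commas > 1) equals B's single scan
theorem pv_line_eq (line : String) :
    (decide (1 < PySem.Str.count line ",") && pvLineBad3 line)
    = pvBScan (PySem.Str.rfind line ",") (PySem.Str.rfind line "\"") (PySem.List.enumerate line.toList) false := by
  have hcomma : ("," : String).toList = [','] := by decide
  have hquote : ("\"" : String).toList = ['"'] := by decide
  set cs := line.toList with hcs
  have hcount : PySem.Str.count line "," = cs.count ',' := pv_count_char line ',' "," hcomma
  have hrC : PySem.Str.rfind line "," = PySem.Chars.rfind cs [','] := by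
    rw [PySem.Str.rfind_eq, hcomma]
  have hrQ : PySem.Str.rfind line "\"" = PySem.Chars.rfind cs ['"'] := by
    rw [PySem.Str.rfind_eq, hquote]
  rw [hrC, hrQ]
  apply Bool.eq_iff_iff.mpr
  rw [Bool.and_eq_true, decide_eq_true_eq]
  rw [pv_scan_iff]
  -- normalize the B side
  have hB : (∃ j : Nat, cs[j]? = some ',' ∧ ((0 : Int) + (j : Int) ≠ PySem.Chars.rfind cs [',']) ∧
        ¬(((false ^^ decide (Odd ((cs.take j).count '"'))) = true) ∧ (0 : Int) + (j : Int) < PySem.Chars.rfind cs ['"'])) ↔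
      (∃ j : Nat, cs[j]? = some ',' ∧ (∃ q, j < q ∧ cs[q]? = some ',') ∧
        ¬(Odd ((cs.take j).count '"') ∧ ∃ q, j < q ∧ cs[q]? = some '"')) := by
    apply exists_congr
    intro j
    constructor
    · rintro ⟨hj, hne, hcond⟩
      refine ⟨hj, (pv_rfind_ne_iff cs ',' j hj).mp (by omega), fun ⟨ho, hq⟩ => hcond ?_⟩
      refine ⟨by simpa using ho, ?_⟩
      have := (pv_rfind_lt_iff cs '"' j).mpr hq
      omega
    · rintro ⟨hj, hne, hcond⟩
      refine ⟨hj, by have := (pv_rfind_ne_iff cs ',' j hj).mpr hne; omega, fun ⟨ho, hq⟩ => hcond ?_⟩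
      refine ⟨by simpa using ho, ?_⟩
      have := (pv_rfind_lt_iff cs '"' j).mp (by omega)
      exact this
  rw [hB]
  -- normalize the A side
  have hA : pvLineBad3 line = true ↔
      (∃ j : Nat, cs[j]? = some ',' ∧ (∃ q, j < q ∧ cs[q]? = some ',') ∧
        ¬(Odd ((cs.take j).count '"') ∧ ∃ q, j < q ∧ cs[q]? = some '"')) := by
    rw [pvLineBad3]
    show (PySem.List.slice (find_occurrences line ',') none (some (-1))).any _ = true ↔ _
    rw [PySem.List.slice_to_neg_one, List.any_eq_true]
    have hfo : ∀ c : Char, find_occurrences line c = pvOcc cs c 0 := fun c => rfl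
    constructor
    · rintro ⟨cp, hcp, hbad⟩
      rw [hfo, pv_mem_dropLast (pvOcc_pairwise cs ',' 0)] at hcp
      obtain ⟨hcp1, y, hy, hcpy⟩ := hcp
      rw [pvOcc_mem] at hcp1
      obtain ⟨j, hj, rfl⟩ := hcp1
      rw [pvOcc_mem] at hy
      obtain ⟨q, hq, rfl⟩ := hy
      refine ⟨j, hj, ⟨q, by omega, hq⟩, ?_⟩
      rintro ⟨ho, qq, hjqq, hqq⟩
      rw [Bool.not_eq_eq_eq_not, Bool.not_true, ← Bool.not_eq_true] at hbad
      apply hbad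
      have hnotin : ((0 : Int) + (j : Int)) ∉ pvOcc cs '"' 0 := by
        rw [pvOcc_mem]
        rintro ⟨j', hj', heq⟩
        have : j = j' := by omega
        subst this
        rw [hj] at hj'
        simp at hj'
      rw [hfo, pv_pairs_any_iff _ (pvOcc_pairwise cs '"' 0) _ hnotin]
      constructor
      · rw [show (fun q => decide (q < (0 : Int) + (j : Int))) = (fun q => decide (q < (0 : Int) + ((j : Nat) : Int))) from rfl]
        rw [pvOcc_filter_take, pvOcc_length]
        exact ho
      · exact ⟨(0 : Int) + (qq : Int), (pvOcc_mem cs '"' 0 _).mpr ⟨qq, hqq, rfl⟩, by omega⟩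
    · rintro ⟨j, hj, ⟨q, hjq, hq⟩, hno⟩
      refine ⟨(0 : Int) + (j : Int), ?_, ?_⟩
      · rw [hfo, pv_mem_dropLast (pvOcc_pairwise cs ',' 0)]
        exact ⟨(pvOcc_mem cs ',' 0 _).mpr ⟨j, hj, rfl⟩,
          ⟨(0 : Int) + (q : Int), (pvOcc_mem cs ',' 0 _).mpr ⟨q, hq, rfl⟩, by omega⟩⟩
      · rw [Bool.not_eq_eq_eq_not, Bool.not_true, ← Bool.not_eq_true]
        have hnotin : ((0 : Int) + (j : Int)) ∉ pvOcc cs '"' 0 := by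
          rw [pvOcc_mem]
          rintro ⟨j', hj', heq⟩
          have : j = j' := by omega
          subst this
          rw [hj] at hj'
          simp at hj'
        rw [hfo, pv_pairs_any_iff _ (pvOcc_pairwise cs '"' 0) _ hnotin]
        rintro ⟨ho, y, hy, hjy⟩
        apply hno
        rw [pvOcc_filter_take, pvOcc_length] at ho
        refine ⟨ho, ?_⟩
        rw [pvOcc_mem] at hy
        obtain ⟨q', hq', rfl⟩ := hy
        exact ⟨q', by omega, hq'⟩
  rw [hA]
  constructor
  · rintro ⟨_, h⟩; exact h
  · intro h
    refine ⟨?_, h⟩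
    obtain ⟨j, hj, ⟨q, hjq, hq⟩, _⟩ := h
    rw [hcount]
    exact pv_two_count cs ',' j q hj hq hjq

theorem pv_loops_eq (ls : List String) : pvALoop ls = pvBLoop ls := by
  induction ls with
  | nil => rfl
  | cons line rest ih =>
    rw [pvALoop, pvBLoop]
    by_cases h0 : PySem.Str.count line "," = 0
    · rw [if_pos h0, if_pos h0]
    · rw [if_neg h0, if_neg h0, pv_line_eq line, ih]

-- ===== VERDICT (by name: the statement is the Claim_ definition above) =====
theorem breaks_comma_rule_spec : Claim_equal_breaks_comma_rule := by
  intro jl _ _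
  unfold Spec_breaks_comma_rule breaks_comma_rule breaks_comma_rule_alt
  rw [pv_loops_eq]
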